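-- pv_equiv track=rewrite | github.com/DouHappy/attention-visualizer | attention_viewer/tokenizer_utils.py | _compute_edit_distance_masks
-- ===== SOURCE A (Python) =====
-- from typing import List, Optional, Sequence, Tuple
--
-- def _compute_edit_distance_masks(
--     source_tokens: Sequence[str], prediction_tokens: Sequence[str]
-- ) -> Tuple[List[int], List[int]]:
--     """Compute indices participating in the minimal edit distance alignment."""
--
--     m = len(source_tokens)
--     n = len(prediction_tokens)
--
--     if m == 0 and n == 0:
--         return [], []
--
--     dp = [[0] * (n + 1) for _ in range(m + 1)]
--
--     for i in range(1, m + 1):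
--         dp[i][0] = i
--     for j in range(1, n + 1):
--         dp[0][j] = j
--
--     for i in range(1, m + 1):
--         for j in range(1, n + 1):
--             cost = 0 if source_tokens[i - 1] == prediction_tokens[j - 1] else 1
--             dp[i][j] = min(
--                 dp[i - 1][j] + 1,
--                 dp[i][j - 1] + 1,
--                 dp[i - 1][j - 1] + cost,
--             )
--
--     i, j = m, n
--     source_indices: List[int] = []
--     prediction_indices: List[int] = []
--
--     while i > 0 or j > 0:
--         if i > 0 and j > 0:
--             cost = 0 if source_tokens[i - 1] == prediction_tokens[j - 1] else 1
--             if dp[i][j] == dp[i - 1][j - 1] + cost: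
--                 if cost == 1:
--                     source_indices.append(i - 1)
--                     prediction_indices.append(j - 1)
--                 i -= 1
--                 j -= 1
--                 continue
--         if i > 0 and dp[i][j] == dp[i - 1][j] + 1:
--             source_indices.append(i - 1)
--             i -= 1
--             continue
--         if j > 0:
--             prediction_indices.append(j - 1)
--             j -= 1
--
--     source_indices.reverse()
--     prediction_indices.reverse()
--     return source_indices, prediction_indices
-- ===== SOURCE B (Python) =====
-- from typing import List, Sequence, Tuple
--
--
-- def _compute_edit_distance_masks(
--     source_tokens: Sequence[str], prediction_tokens: Sequence[str]
-- ) -> Tuple[List[int], List[int]]: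
--     """Answer-carrying DP: every cell stores its edit distance together with
--     persistent linked chains of the mismatch indices of its alignment, so the
--     result is read directly off the final cell -- there is no traceback loop.
--     Chains are shared cons-cells (index, parent), newest index first."""
--
--     m = len(source_tokens)
--     n = len(prediction_tokens)
--
--     if m == 0 and n == 0:
--         return [], []
--
--     # cell = (distance, source_chain, prediction_chain); chain = None | (idx, parent)
--     table = [[None] * (n + 1) for _ in range(m + 1)]
--     table[0][0] = (0, None, None)
--     for i in range(1, m + 1):
--         d, s, p = table[i - 1][0]
--         table[i][0] = (d + 1, (i - 1, s), p)
--     for j in range(1, n + 1):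
--         d, s, p = table[0][j - 1]
--         table[0][j] = (d + 1, s, (j - 1, p))
--
--     for i in range(1, m + 1):
--         for j in range(1, n + 1):
--             cost = 0 if source_tokens[i - 1] == prediction_tokens[j - 1] else 1
--             du, su, pu = table[i - 1][j]
--             dl, sl, pl = table[i][j - 1]
--             dd, sd, pd = table[i - 1][j - 1]
--             best = min(du + 1, dl + 1, dd + cost)
--             if best == dd + cost:
--                 if cost == 0:
--                     table[i][j] = (best, sd, pd)
--                 else:
--                     table[i][j] = (best, (i - 1, sd), (j - 1, pd))
--             elif best == du + 1:
--                 table[i][j] = (best, (i - 1, su), pu)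
--             else:
--                 table[i][j] = (best, sl, (j - 1, pl))
--
--     _, s, p = table[m][n]
--     source_indices: List[int] = []
--     while s is not None:
--         source_indices.append(s[0])
--         s = s[1]
--     source_indices.reverse()
--     prediction_indices: List[int] = []
--     while p is not None:
--         prediction_indices.append(p[0])
--         p = p[1]
--     prediction_indices.reverse()
--     return source_indices, prediction_indices
-- ===== Notes on version B (the rewrite author's own statement) =====
-- stated objective: alternative
-- what changed: B removes the traceback loop entirely: each DP cell carries its distance together with persistent linked chains (shared cons cells) of the mismatch indices of its own alignment, built forward during the fill with A's diagonal>up>left tie-break, and the answer is read directly off the final cell; A fills a plain distance matrix and then re-walks it comparing dp values.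
import Mathlib
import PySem

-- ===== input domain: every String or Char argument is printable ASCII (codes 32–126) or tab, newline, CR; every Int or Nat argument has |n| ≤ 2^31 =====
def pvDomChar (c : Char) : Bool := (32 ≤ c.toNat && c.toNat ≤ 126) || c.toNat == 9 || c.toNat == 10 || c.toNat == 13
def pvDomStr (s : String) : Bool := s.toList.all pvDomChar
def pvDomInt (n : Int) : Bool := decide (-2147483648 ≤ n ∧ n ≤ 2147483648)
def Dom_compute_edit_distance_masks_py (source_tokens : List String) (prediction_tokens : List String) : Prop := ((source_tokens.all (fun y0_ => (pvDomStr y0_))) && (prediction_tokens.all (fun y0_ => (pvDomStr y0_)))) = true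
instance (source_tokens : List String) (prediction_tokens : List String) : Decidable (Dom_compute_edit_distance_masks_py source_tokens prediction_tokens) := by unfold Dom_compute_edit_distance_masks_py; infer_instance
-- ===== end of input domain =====

-- B removes the traceback loop: each DP cell carries its distance together with
-- persistent chains of the mismatch indices of its own alignment (same
-- diagonal>up>left tie-break), and the answer is read off the final cell; an
-- alternative of the same asymptotic cost.


-- ===== PORT A =====
-- the 2-D dp list-of-lists is rendered as a first-order map keyed by (row, col):
-- pvPutA is the in-place assignment dp[i][j] = v, pvGetA the read dp[i][j]
-- (default 0 = the all-zero matrix Python starts from; indices at all use sites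
-- are in range, so this is exact for the Python list-of-lists)
def pvPutA (t : List ((Nat × Nat) × Int)) (i j : Nat) (v : Int) : List ((Nat × Nat) × Int) :=
  ((i, j), v) :: t

def pvGetA (t : List ((Nat × Nat) × Int)) (i j : Nat) : Int :=
  ((t.find? (fun e => e.1.1 == i && e.1.2 == j)).map (fun e => e.2)).getD 0

-- cost = 0 if source_tokens[i-1] == prediction_tokens[j-1] else 1 (i, j ≥ 1 at use sites)
def pvCost (src pred : List String) (i j : Nat) : Int :=
  if src.getD (i - 1) "" = pred.getD (j - 1) "" then 0 else 1

-- dp[i][j] = min(dp[i-1][j] + 1, dp[i][j-1] + 1, dp[i-1][j-1] + cost)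
def pvBodyA (src pred : List String) (t : List ((Nat × Nat) × Int)) (i j : Nat) : List ((Nat × Nat) × Int) :=
  pvPutA t i j (min (pvGetA t (i - 1) j + 1) (min (pvGetA t i (j - 1) + 1)
    (pvGetA t (i - 1) (j - 1) + pvCost src pred i j)))

def pvFillA (src pred : List String) (m n : Nat) : List ((Nat × Nat) × Int) :=
  let dp1 := (List.range' 1 m).foldl (fun t i => pvPutA t i 0 (i : Int)) []
  let dp2 := (List.range' 1 n).foldl (fun t j => pvPutA t 0 j (j : Int)) dp1
  (List.range' 1 m).foldl (fun t i =>
    (List.range' 1 n).foldl (fun t j => pvBodyA src pred t i j) t) dp2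

-- the while loop; fuel m+n is exact (i+j drops by at least 1 each iteration)
def pvTraceA (src pred : List String) (dp : List ((Nat × Nat) × Int)) :
    Nat → Nat → Nat → List Int → List Int → List Int × List Int
  | _, _, 0, si, pj => (si, pj)
  | i, j, fuel + 1, si, pj =>
    if i > 0 ∨ j > 0 then
      if i > 0 ∧ j > 0 ∧ pvGetA dp i j = pvGetA dp (i - 1) (j - 1) + pvCost src pred i j then
        if pvCost src pred i j = 1 then
          pvTraceA src pred dp (i - 1) (j - 1) fuel (si ++ [(i : Int) - 1]) (pj ++ [(j : Int) - 1])
        else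
          pvTraceA src pred dp (i - 1) (j - 1) fuel si pj
      else if i > 0 ∧ pvGetA dp i j = pvGetA dp (i - 1) j + 1 then
        pvTraceA src pred dp (i - 1) j fuel (si ++ [(i : Int) - 1]) pj
      else if j > 0 then
        pvTraceA src pred dp i (j - 1) fuel si (pj ++ [(j : Int) - 1])
      else (si, pj)
    else (si, pj)

def compute_edit_distance_masks_py (source_tokens : List String) (prediction_tokens : List String) : List Int × List Int :=
  let m := source_tokens.length
  let n := prediction_tokens.length
  if m = 0 ∧ n = 0 then ([], [])
  else
    let dp := pvFillA source_tokens prediction_tokens m n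
    let r := pvTraceA source_tokens prediction_tokens dp m n (m + n) [] []
    (r.1.reverse, r.2.reverse)

-- ===== PORT B =====
-- B's cell = (distance, source chain, prediction chain); a Python chain
-- None | (idx, parent) is a List Int with the newest index first (cons = making
-- a node); the table of cells is the same first-order (row, col)-keyed map.
-- The unfilled Python cell None is rendered as the default (0, [], []) — every
-- cell B reads has been filled, and the seed table[0][0] = (0, None, None) is
-- exactly that value.
def pvPutB (t : List ((Nat × Nat) × (Int × List Int × List Int))) (i j : Nat)
    (v : Int × List Int × List Int) : List ((Nat × Nat) × (Int × List Int × List Int)) :=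
  ((i, j), v) :: t

def pvGetB (t : List ((Nat × Nat) × (Int × List Int × List Int))) (i j : Nat) :
    Int × List Int × List Int :=
  ((t.find? (fun e => e.1.1 == i && e.1.2 == j)).map (fun e => e.2)).getD (0, [], [])

def pvBodyB (src pred : List String) (t : List ((Nat × Nat) × (Int × List Int × List Int)))
    (i j : Nat) : List ((Nat × Nat) × (Int × List Int × List Int)) :=
  let cost := pvCost src pred i j
  let u := pvGetB t (i - 1) j
  let l := pvGetB t i (j - 1)
  let d := pvGetB t (i - 1) (j - 1)
  let best := min (u.1 + 1) (min (l.1 + 1) (d.1 + cost))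
  pvPutB t i j
    (if best = d.1 + cost then
      if cost = 0 then (best, d.2.1, d.2.2)
      else (best, ((i : Int) - 1) :: d.2.1, ((j : Int) - 1) :: d.2.2)
    else if best = u.1 + 1 then (best, ((i : Int) - 1) :: u.2.1, u.2.2)
    else (best, l.2.1, ((j : Int) - 1) :: l.2.2))

def pvFillB (src pred : List String) (m n : Nat) : List ((Nat × Nat) × (Int × List Int × List Int)) :=
  let t0 := pvPutB [] 0 0 (0, [], [])
  let t1 := (List.range' 1 m).foldl
    (fun t i => pvPutB t i 0 ((pvGetB t (i - 1) 0).1 + 1, ((i : Int) - 1) :: (pvGetB t (i - 1) 0).2.1, (pvGetB t (i - 1) 0).2.2))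
    t0
  let t2 := (List.range' 1 n).foldl
    (fun t j => pvPutB t 0 j ((pvGetB t 0 (j - 1)).1 + 1, (pvGetB t 0 (j - 1)).2.1, ((j : Int) - 1) :: (pvGetB t 0 (j - 1)).2.2))
    t1
  (List.range' 1 m).foldl (fun t i =>
    (List.range' 1 n).foldl (fun t j => pvBodyB src pred t i j) t) t2

def compute_edit_distance_masks_py_alt (source_tokens : List String) (prediction_tokens : List String) : List Int × List Int :=
  let m := source_tokens.length
  let n := prediction_tokens.length
  if m = 0 ∧ n = 0 then ([], [])
  else
    let c := pvGetB (pvFillB source_tokens prediction_tokens m n) m n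
    (c.2.1.reverse, c.2.2.reverse)

-- ===== PRECONDITION & SPEC =====
def Spec_compute_edit_distance_masks_py (source_tokens : List String) (prediction_tokens : List String) (out : List Int × List Int) : Prop := out = compute_edit_distance_masks_py_alt source_tokens prediction_tokens
instance (source_tokens : List String) (prediction_tokens : List String) (out : List Int × List Int) : Decidable (Spec_compute_edit_distance_masks_py source_tokens prediction_tokens out) := by unfold Spec_compute_edit_distance_masks_py; infer_instance

-- ===== CLAIM (what is proved, stated in full; the proofs are below) =====
def Claim_equal_compute_edit_distance_masks_py : Prop := ∀ (source_tokens : List String) (prediction_tokens : List String), Dom_compute_edit_distance_masks_py source_tokens prediction_tokens → Spec_compute_edit_distance_masks_py source_tokens prediction_tokens (compute_edit_distance_masks_py source_tokens prediction_tokens)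

-- ===== LEMMAS AND PROOFS =====

-- reads after a write / on the empty table
theorem pvGetA_put (t : List ((Nat × Nat) × Int)) (i j : Nat) (v : Int) (i' j' : Nat) :
    pvGetA (pvPutA t i j v) i' j' = if i' = i ∧ j' = j then v else pvGetA t i' j' := by
  unfold pvGetA pvPutA
  by_cases h : i' = i ∧ j' = j
  · obtain ⟨rfl, rfl⟩ := h
    rw [if_pos ⟨rfl, rfl⟩, List.find?_cons_of_pos (by simp)]
    rfl
  · rw [if_neg h, List.find?_cons_of_neg (by simp only [Bool.and_eq_true, beq_iff_eq]; omega)]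

theorem pvGetA_nil (i j : Nat) : pvGetA [] i j = 0 := rfl

theorem pvGetB_put (t : List ((Nat × Nat) × (Int × List Int × List Int))) (i j : Nat)
    (v : Int × List Int × List Int) (i' j' : Nat) :
    pvGetB (pvPutB t i j v) i' j' = if i' = i ∧ j' = j then v else pvGetB t i' j' := by
  unfold pvGetB pvPutB
  by_cases h : i' = i ∧ j' = j
  · obtain ⟨rfl, rfl⟩ := h
    rw [if_pos ⟨rfl, rfl⟩, List.find?_cons_of_pos (by simp)]
    rfl
  · rw [if_neg h, List.find?_cons_of_neg (by simp only [Bool.and_eq_true, beq_iff_eq]; omega)]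

theorem pvGetB_nil (i j : Nat) : pvGetB [] i j = (0, [], []) := rfl

-- chain [k-1, k-2, …, 0] : the boundary chains
def pvDesc : Nat → List Int
  | 0 => []
  | k + 1 => (k : Int) :: pvDesc k

-- closed form of A's two boundary fills (constant writes)
theorem pvBoundA_row (l : List Nat) (t : List ((Nat × Nat) × Int)) (i' j' : Nat) :
    pvGetA (l.foldl (fun t i => pvPutA t i 0 (i : Int)) t) i' j'
    = if j' = 0 ∧ i' ∈ l then (i' : Int) else pvGetA t i' j' := by
  induction l generalizing t with
  | nil => simp
  | cons c l ih =>
    simp only [List.foldl_cons, ih, List.mem_cons]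
    by_cases hj : j' = 0
    · subst hj
      by_cases hl : i' ∈ l
      · simp [hl]
      · by_cases hc : i' = c
        · subst hc; simp [hl, pvGetA_put]
        · simp [hl, hc, pvGetA_put]
    · simp [hj, pvGetA_put]

theorem pvBoundA_col (l : List Nat) (t : List ((Nat × Nat) × Int)) (i' j' : Nat) :
    pvGetA (l.foldl (fun t j => pvPutA t 0 j (j : Int)) t) i' j'
    = if i' = 0 ∧ j' ∈ l then (j' : Int) else pvGetA t i' j' := by
  induction l generalizing t with
  | nil => simp
  | cons c l ih =>
    simp only [List.foldl_cons, ih, List.mem_cons]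
    by_cases hi : i' = 0
    · subst hi
      by_cases hl : j' ∈ l
      · simp [hl]
      · by_cases hc : j' = c
        · subst hc; simp [hl, pvGetA_put]
        · simp [hl, hc, pvGetA_put]
    · simp [hi, pvGetA_put]

-- closed form of B's boundary fills (sequential writes)
theorem pvBoundB_row (m : Nat) : ∀ i j,
    pvGetB ((List.range' 1 m).foldl
      (fun t i => pvPutB t i 0 ((pvGetB t (i - 1) 0).1 + 1, ((i : Int) - 1) :: (pvGetB t (i - 1) 0).2.1, (pvGetB t (i - 1) 0).2.2))
      (pvPutB [] 0 0 (0, [], []))) i j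
    = if j = 0 ∧ 1 ≤ i ∧ i ≤ m then ((i : Int), pvDesc i, []) else (0, [], []) := by
  induction m with
  | zero =>
    intro i j
    rw [if_neg (by omega), List.range'_zero, List.foldl_nil, pvGetB_put]
    by_cases h : i = 0 ∧ j = 0
    · rw [if_pos h]
    · rw [if_neg h, pvGetB_nil]
  | succ m ih =>
    intro i j
    rw [List.range'_concat, List.foldl_append, List.foldl_cons, List.foldl_nil]
    simp only [Nat.one_mul]
    have hTm : pvGetB ((List.range' 1 m).foldl
        (fun t i => pvPutB t i 0 ((pvGetB t (i - 1) 0).1 + 1, ((i : Int) - 1) :: (pvGetB t (i - 1) 0).2.1, (pvGetB t (i - 1) 0).2.2))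
        (pvPutB [] 0 0 (0, [], []))) (1 + m - 1) 0 = ((m : Int), pvDesc m, []) := by
      rw [ih]
      rcases Nat.eq_zero_or_pos m with h | h
      · subst h; rw [if_neg (by omega)]; rfl
      · rw [if_pos (by omega)]
        have : 1 + m - 1 = m := by omega
        rw [this]
    rw [pvGetB_put, hTm]
    by_cases hc : i = 1 + m ∧ j = 0
    · rw [if_pos hc, if_pos (by omega)]
      obtain ⟨hi, hj⟩ := hc
      subst hi
      have h1 : 1 + m = m + 1 := by omega
      rw [h1]
      show ((m : Int) + 1, (((m + 1 : Nat) : Int) - 1) :: pvDesc m, ([] : List Int))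
        = (((m + 1 : Nat) : Int), pvDesc (m + 1), [])
      have h2 : ((m + 1 : Nat) : Int) - 1 = (m : Int) := by push_cast; ring
      rw [h2]
      have h3 : ((m + 1 : Nat) : Int) = (m : Int) + 1 := by push_cast; ring
      rw [h3]
      rfl
    · rw [if_neg hc, ih i j]
      by_cases h2 : j = 0 ∧ 1 ≤ i ∧ i ≤ m
      · rw [if_pos h2, if_pos (by omega)]
      · rw [if_neg h2, if_neg (by omega)]

theorem pvBoundB_col (n : Nat) (t1 : List ((Nat × Nat) × (Int × List Int × List Int)))
    (h0 : pvGetB t1 0 0 = (0, [], [])) : ∀ i j,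
    pvGetB ((List.range' 1 n).foldl
      (fun t j => pvPutB t 0 j ((pvGetB t 0 (j - 1)).1 + 1, (pvGetB t 0 (j - 1)).2.1, ((j : Int) - 1) :: (pvGetB t 0 (j - 1)).2.2))
      t1) i j
    = if i = 0 ∧ 1 ≤ j ∧ j ≤ n then ((j : Int), [], pvDesc j) else pvGetB t1 i j := by
  induction n with
  | zero =>
    intro i j
    rw [if_neg (by omega)]
    rfl
  | succ n ih =>
    intro i j
    rw [List.range'_concat, List.foldl_append, List.foldl_cons, List.foldl_nil]
    simp only [Nat.one_mul]
    have hTn : pvGetB ((List.range' 1 n).foldl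
        (fun t j => pvPutB t 0 j ((pvGetB t 0 (j - 1)).1 + 1, (pvGetB t 0 (j - 1)).2.1, ((j : Int) - 1) :: (pvGetB t 0 (j - 1)).2.2))
        t1) 0 (1 + n - 1) = ((n : Int), [], pvDesc n) := by
      rw [ih]
      rcases Nat.eq_zero_or_pos n with h | h
      · subst h; rw [if_neg (by omega)]; exact h0
      · rw [if_pos (by omega)]
        have : 1 + n - 1 = n := by omega
        rw [this]
    rw [pvGetB_put, hTn]
    by_cases hc : i = 0 ∧ j = 1 + n
    · rw [if_pos hc, if_pos (by omega)]
      obtain ⟨hi, hj⟩ := hc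
      subst hj
      have h1 : 1 + n = n + 1 := by omega
      rw [h1]
      show ((n : Int) + 1, ([] : List Int), (((n + 1 : Nat) : Int) - 1) :: pvDesc n)
        = (((n + 1 : Nat) : Int), [], pvDesc (n + 1))
      have h2 : ((n + 1 : Nat) : Int) - 1 = (n : Int) := by push_cast; ring
      rw [h2]
      have h3 : ((n + 1 : Nat) : Int) = (n : Int) + 1 := by push_cast; ring
      rw [h3]
      rfl
    · rw [if_neg hc, ih i j]
      by_cases h2 : i = 0 ∧ 1 ≤ j ∧ j ≤ n
      · rw [if_pos h2, if_pos (by omega)]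
      · rw [if_neg h2, if_neg (by omega)]

-- the table after the two boundary fills, before the main fill
def pvT2 (m n : Nat) : Nat → Nat → Int × List Int × List Int :=
  fun i j =>
    if j = 0 ∧ 1 ≤ i ∧ i ≤ m then ((i : Int), pvDesc i, [])
    else if i = 0 ∧ 1 ≤ j ∧ j ≤ n then ((j : Int), [], pvDesc j)
    else (0, [], [])

theorem pvT2_eq (m n : Nat) (i j : Nat) :
    pvGetB ((List.range' 1 n).foldl
      (fun t j => pvPutB t 0 j ((pvGetB t 0 (j - 1)).1 + 1, (pvGetB t 0 (j - 1)).2.1, ((j : Int) - 1) :: (pvGetB t 0 (j - 1)).2.2))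
      ((List.range' 1 m).foldl
        (fun t i => pvPutB t i 0 ((pvGetB t (i - 1) 0).1 + 1, ((i : Int) - 1) :: (pvGetB t (i - 1) 0).2.1, (pvGetB t (i - 1) 0).2.2))
        (pvPutB [] 0 0 (0, [], [])))) i j
    = pvT2 m n i j := by
  rw [pvBoundB_col n _ (by rw [pvBoundB_row]; rw [if_neg (by omega)]) i j]
  unfold pvT2
  by_cases h1 : i = 0 ∧ 1 ≤ j ∧ j ≤ n
  · rw [if_pos h1, if_neg (by omega), if_pos h1]
  · rw [if_neg h1, pvBoundB_row]
    by_cases h2 : j = 0 ∧ 1 ≤ i ∧ i ≤ m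
    · rw [if_pos h2, if_pos h2]
    · rw [if_neg h2, if_neg h2, if_neg h1]

-- L1: the first component of B's table equals A's dp table, stage by stage
theorem pvRow_fst (src pred : List String) (i : Nat) (l : List Nat)
    (tA : List ((Nat × Nat) × Int)) (tB : List ((Nat × Nat) × (Int × List Int × List Int)))
    (h : ∀ i j, (pvGetB tB i j).1 = pvGetA tA i j) :
    ∀ i' j', (pvGetB (l.foldl (fun t j => pvBodyB src pred t i j) tB) i' j').1
      = pvGetA (l.foldl (fun t j => pvBodyA src pred t i j) tA) i' j' := by
  induction l generalizing tA tB with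
  | nil => exact h
  | cons c l ih =>
    refine ih _ _ ?_
    intro i' j'
    simp only [pvBodyA, pvBodyB, pvGetA_put, pvGetB_put]
    by_cases hc : i' = i ∧ j' = c
    · simp only [hc, and_self, if_true]
      split_ifs <;> simp [h]
    · simp [hc, h]

theorem pvGrid_fst (src pred : List String) (n : Nat) (l : List Nat)
    (tA : List ((Nat × Nat) × Int)) (tB : List ((Nat × Nat) × (Int × List Int × List Int)))
    (h : ∀ i j, (pvGetB tB i j).1 = pvGetA tA i j) :
    ∀ i' j', (pvGetB (l.foldl (fun t i => (List.range' 1 n).foldl (fun t j => pvBodyB src pred t i j) t) tB) i' j').1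
      = pvGetA (l.foldl (fun t i => (List.range' 1 n).foldl (fun t j => pvBodyA src pred t i j) t) tA) i' j' := by
  induction l generalizing tA tB with
  | nil => exact h
  | cons c l ih => exact ih _ _ (pvRow_fst src pred c (List.range' 1 n) tA tB h)

theorem pvFill_fst (src pred : List String) (m n : Nat) :
    ∀ i j, (pvGetB (pvFillB src pred m n) i j).1 = pvGetA (pvFillA src pred m n) i j := by
  unfold pvFillA pvFillB
  apply pvGrid_fst
  intro i j
  rw [pvT2_eq, pvBoundA_col, pvBoundA_row]
  unfold pvT2
  simp only [List.mem_range'_1]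
  by_cases h1 : i = 0 ∧ 1 ≤ j ∧ j ≤ n
  · rw [if_neg (by omega), if_pos h1, if_pos (by omega)]
  · rw [if_neg h1]
    by_cases h2 : j = 0 ∧ 1 ≤ i ∧ i ≤ m
    · rw [if_pos h2, if_neg (by omega), if_pos (by omega)]
    · rw [if_neg h2, if_neg (by omega), if_neg (by omega), pvGetA_nil]

-- the local invariant of an interior cell of B's final table
def pvCellOK (src pred : List String) (t : List ((Nat × Nat) × (Int × List Int × List Int))) (i j : Nat) : Prop :=
  pvGetB t i j =
    (let cost := pvCost src pred i j
     let u := pvGetB t (i - 1) j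
     let l := pvGetB t i (j - 1)
     let d := pvGetB t (i - 1) (j - 1)
     let best := min (u.1 + 1) (min (l.1 + 1) (d.1 + cost))
     if best = d.1 + cost then
       if cost = 0 then (best, d.2.1, d.2.2)
       else (best, ((i : Int) - 1) :: d.2.1, ((j : Int) - 1) :: d.2.2)
     else if best = u.1 + 1 then (best, ((i : Int) - 1) :: u.2.1, u.2.2)
     else (best, l.2.1, ((j : Int) - 1) :: l.2.2))

-- inner (row) fill: cells (i, j) for j ∈ l get pvCellOK; every other cell is untouched
theorem pvInner_inv (src pred : List String) (i : Nat) (hi : 1 ≤ i) (l : List Nat)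
    (hl : ∀ j ∈ l, 1 ≤ j) (hsort : List.Pairwise (· < ·) l)
    (t : List ((Nat × Nat) × (Int × List Int × List Int))) :
    (∀ i' j', (i' = i → j' ∉ l) →
      pvGetB (l.foldl (fun t j => pvBodyB src pred t i j) t) i' j' = pvGetB t i' j')
    ∧ (∀ j ∈ l, pvCellOK src pred (l.foldl (fun t j => pvBodyB src pred t i j) t) i j) := by
  induction l generalizing t with
  | nil => exact ⟨fun _ _ _ => rfl, fun j h => absurd h List.not_mem_nil⟩
  | cons c l ih =>
    have hc1 : 1 ≤ c := hl c List.mem_cons_self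
    have hlt : ∀ j ∈ l, c < j := fun j hj => (List.pairwise_cons.1 hsort).1 j hj
    have hl' : ∀ j ∈ l, 1 ≤ j := fun j hj => hl j (List.mem_cons_of_mem _ hj)
    obtain ⟨ihU, ihC⟩ := ih hl' (List.pairwise_cons.1 hsort).2 (pvBodyB src pred t i c)
    constructor
    · intro i' j' hnot
      simp only [List.foldl_cons]
      rw [ihU i' j' (fun h hj => hnot h (List.mem_cons_of_mem _ hj))]
      simp only [pvBodyB, pvGetB_put]
      have hne : ¬ (i' = i ∧ j' = c) := by
        rintro ⟨h1, h2⟩; exact hnot h1 (h2 ▸ List.mem_cons_self)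
      simp [hne]
    · intro j hj
      rcases List.mem_cons.1 hj with hj | hj
      · subst hj
        simp only [List.foldl_cons]
        have hii : (i : Nat) - 1 ≠ i := by omega
        have hcell : ∀ j', pvGetB (l.foldl (fun t j => pvBodyB src pred t i j) (pvBodyB src pred t i j)) (i-1) j' = pvGetB (pvBodyB src pred t i j) (i-1) j' :=
          fun j' => ihU _ _ (fun h => absurd h hii)
        have hcc : ∀ j', j' ≤ j → pvGetB (l.foldl (fun t j => pvBodyB src pred t i j) (pvBodyB src pred t i j)) i j' = pvGetB (pvBodyB src pred t i j) i j' :=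
          fun j' hj' => ihU _ _ (fun _ hmem => by have := hlt j' hmem; omega)
        unfold pvCellOK
        rw [hcell, hcell, hcc j le_rfl, hcc (j-1) (by omega)]
        have hjj : (j:Nat) - 1 ≠ j := by omega
        simp only [pvBodyB, pvGetB_put, hii, hjj, and_true, and_false,
          not_false_iff, and_self, if_pos, if_neg]
      · exact ihC j hj

-- outer (grid) fill: all interior cells get pvCellOK, every other cell is untouched
theorem pvOuter_inv (src pred : List String) (n : Nat) (l : List Nat)
    (hl : ∀ i ∈ l, 1 ≤ i) (hsort : List.Pairwise (· < ·) l)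
    (t : List ((Nat × Nat) × (Int × List Int × List Int))) :
    (∀ i' j', (i' ∉ l ∨ j' = 0 ∨ n < j') →
      pvGetB (l.foldl (fun t i => (List.range' 1 n).foldl (fun t j => pvBodyB src pred t i j) t) t) i' j' = pvGetB t i' j')
    ∧ (∀ i ∈ l, ∀ j, 1 ≤ j → j ≤ n →
      pvCellOK src pred (l.foldl (fun t i => (List.range' 1 n).foldl (fun t j => pvBodyB src pred t i j) t) t) i j) := by
  induction l generalizing t with
  | nil => exact ⟨fun _ _ _ => rfl, fun i h => absurd h List.not_mem_nil⟩
  | cons c l ih =>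
    have hc1 : 1 ≤ c := hl c List.mem_cons_self
    have hlt : ∀ i ∈ l, c < i := fun i hi => (List.pairwise_cons.1 hsort).1 i hi
    have hl' : ∀ i ∈ l, 1 ≤ i := fun i hi => hl i (List.mem_cons_of_mem _ hi)
    have hrange : ∀ j ∈ List.range' 1 n, 1 ≤ j := by
      intro j hj; rw [List.mem_range'_1] at hj; omega
    obtain ⟨rowU, rowC⟩ := pvInner_inv src pred c hc1 (List.range' 1 n) hrange
      (List.pairwise_lt_range' ..) t
    obtain ⟨ihU, ihC⟩ := ih hl' (List.pairwise_cons.1 hsort).2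
      ((List.range' 1 n).foldl (fun t j => pvBodyB src pred t c j) t)
    constructor
    · intro i' j' hnot
      simp only [List.foldl_cons]
      have hnotl : i' ∉ l ∨ j' = 0 ∨ n < j' := by
        rcases hnot with h | h
        · exact Or.inl (fun hm => h (List.mem_cons_of_mem _ hm))
        · exact Or.inr h
      rw [ihU i' j' hnotl]
      apply rowU
      intro hic
      rw [List.mem_range'_1]
      rcases hnot with h | h
      · exact absurd (hic ▸ List.mem_cons_self) h
      · omega
    · intro i hi j hj1 hjn
      rcases List.mem_cons.1 hi with hi | hi
      · subst hi
        simp only [List.foldl_cons]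
        have hpres : ∀ i' j', i' ≤ i →
            pvGetB (l.foldl (fun t i => (List.range' 1 n).foldl (fun t j => pvBodyB src pred t i j) t)
              ((List.range' 1 n).foldl (fun t j => pvBodyB src pred t i j) t)) i' j'
            = pvGetB ((List.range' 1 n).foldl (fun t j => pvBodyB src pred t i j) t) i' j' := by
          intro i' j' hile
          apply ihU
          left; intro hm; have := hlt i' hm; omega
        have hcell := rowC j (by rw [List.mem_range'_1]; omega)
        unfold pvCellOK at hcell ⊢
        rw [hpres _ _ le_rfl, hpres _ _ (by omega), hpres _ _ le_rfl, hpres _ _ (by omega)]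
        exact hcell
      · exact ihC i hi j hj1 hjn

-- B's final table: boundary cells and interior pvCellOK
theorem pvFillB_boundary (src pred : List String) (m n : Nat) (i j : Nat)
    (h : j = 0 ∨ i = 0) :
    pvGetB (pvFillB src pred m n) i j = pvT2 m n i j := by
  unfold pvFillB
  have hrange : ∀ i ∈ List.range' 1 m, 1 ≤ i := by
    intro i hi; rw [List.mem_range'_1] at hi; omega
  obtain ⟨hU, _⟩ := pvOuter_inv src pred n (List.range' 1 m) hrange (List.pairwise_lt_range' ..)
    ((List.range' 1 n).foldl
      (fun t j => pvPutB t 0 j ((pvGetB t 0 (j - 1)).1 + 1, (pvGetB t 0 (j - 1)).2.1, ((j : Int) - 1) :: (pvGetB t 0 (j - 1)).2.2))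
      ((List.range' 1 m).foldl
        (fun t i => pvPutB t i 0 ((pvGetB t (i - 1) 0).1 + 1, ((i : Int) - 1) :: (pvGetB t (i - 1) 0).2.1, (pvGetB t (i - 1) 0).2.2))
        (pvPutB [] 0 0 (0, [], []))))
  have hnot : i ∉ List.range' 1 m ∨ j = 0 ∨ n < j := by
    rcases h with h | h
    · exact Or.inr (Or.inl h)
    · left; rw [List.mem_range'_1]; omega
  rw [hU i j hnot, pvT2_eq]

theorem pvFillB_cell (src pred : List String) (m n : Nat) (i j : Nat)
    (hi1 : 1 ≤ i) (him : i ≤ m) (hj1 : 1 ≤ j) (hjn : j ≤ n) :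
    pvCellOK src pred (pvFillB src pred m n) i j := by
  unfold pvFillB
  have hrange : ∀ i ∈ List.range' 1 m, 1 ≤ i := by
    intro i hi; rw [List.mem_range'_1] at hi; omega
  obtain ⟨_, hC⟩ := pvOuter_inv src pred n (List.range' 1 m) hrange (List.pairwise_lt_range' ..)
    ((List.range' 1 n).foldl
      (fun t j => pvPutB t 0 j ((pvGetB t 0 (j - 1)).1 + 1, (pvGetB t 0 (j - 1)).2.1, ((j : Int) - 1) :: (pvGetB t 0 (j - 1)).2.2))
      ((List.range' 1 m).foldl
        (fun t i => pvPutB t i 0 ((pvGetB t (i - 1) 0).1 + 1, ((i : Int) - 1) :: (pvGetB t (i - 1) 0).2.1, (pvGetB t (i - 1) 0).2.2))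
        (pvPutB [] 0 0 (0, [], []))))
  exact hC i (by rw [List.mem_range'_1]; omega) j hj1 hjn

-- pvDesc unrolls one step
theorem pvDesc_succ (k : Nat) (h : 1 ≤ k) : pvDesc k = ((k : Int) - 1) :: pvDesc (k - 1) := by
  obtain ⟨k', rfl⟩ : ∃ k', k = k' + 1 := ⟨k - 1, by omega⟩
  simp [pvDesc]

-- pvCost is 0 or 1
theorem pvCost_cases (src pred : List String) (i j : Nat) (h : ¬ pvCost src pred i j = 1) :
    pvCost src pred i j = 0 := by
  unfold pvCost at h ⊢
  split_ifs at h ⊢ with hm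
  · rfl
  · exact absurd rfl h

-- A's traceback from (i, j) produces exactly the chains stored in B's cell (i, j)
theorem pvTrace_chain (src pred : List String) (m n : Nat) :
    ∀ fuel i j si pj, i ≤ m → j ≤ n → i + j ≤ fuel →
      pvTraceA src pred (pvFillA src pred m n) i j fuel si pj
      = (si ++ (pvGetB (pvFillB src pred m n) i j).2.1, pj ++ (pvGetB (pvFillB src pred m n) i j).2.2) := by
  intro fuel
  induction fuel with
  | zero =>
    intro i j si pj him hjn hf
    have hi : i = 0 := by omega
    have hj : j = 0 := by omega
    subst hi; subst hj
    have hb : pvGetB (pvFillB src pred m n) 0 0 = (0, [], []) := by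
      rw [pvFillB_boundary src pred m n 0 0 (Or.inl rfl)]
      unfold pvT2
      rw [if_neg (by omega), if_neg (by omega)]
    simp [pvTraceA, hb]
  | succ fuel ih =>
    intro i j si pj him hjn hf
    have hfst := pvFill_fst src pred m n
    by_cases hij : i > 0 ∨ j > 0
    · rcases Nat.eq_zero_or_pos i with hi0 | hi1
      · -- i = 0, j > 0 : both go left
        subst hi0
        have hj1 : j > 0 := by omega
        have hb : pvGetB (pvFillB src pred m n) 0 j = ((j : Int), [], pvDesc j) := by
          rw [pvFillB_boundary src pred m n 0 j (Or.inr rfl)]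
          unfold pvT2
          rw [if_neg (by omega), if_pos (by omega)]
        have hb1 : (pvGetB (pvFillB src pred m n) 0 (j - 1)).2.1 = [] ∧ (pvGetB (pvFillB src pred m n) 0 (j - 1)).2.2 = pvDesc (j - 1) := by
          rw [pvFillB_boundary src pred m n 0 (j - 1) (Or.inr rfl)]
          unfold pvT2
          rcases Nat.eq_zero_or_pos (j - 1) with h | h
          · rw [if_neg (by omega), if_neg (by omega), h]
            exact ⟨rfl, rfl⟩
          · rw [if_neg (by omega), if_pos (by omega)]
            exact ⟨rfl, rfl⟩
        have hnd : ¬ ((0 : Nat) > 0 ∧ j > 0 ∧ pvGetA (pvFillA src pred m n) 0 j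
            = pvGetA (pvFillA src pred m n) (0 - 1) (j - 1) + pvCost src pred 0 j) := by
          rintro ⟨h, _⟩; omega
        have hnu : ¬ ((0 : Nat) > 0 ∧ pvGetA (pvFillA src pred m n) 0 j = pvGetA (pvFillA src pred m n) (0 - 1) j + 1) := by
          rintro ⟨h, _⟩; omega
        simp only [pvTraceA]
        rw [if_pos hij, if_neg hnd, if_neg hnu, if_pos hj1]
        rw [ih 0 (j - 1) si (pj ++ [(j : Int) - 1]) (by omega) (by omega) (by omega)]
        rw [hb, hb1.1, hb1.2, pvDesc_succ j hj1]
        simp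
      rcases Nat.eq_zero_or_pos j with hj0 | hj1
      · -- j = 0, i > 0 : both go up
        subst hj0
        have hb : pvGetB (pvFillB src pred m n) i 0 = ((i : Int), pvDesc i, []) := by
          rw [pvFillB_boundary src pred m n i 0 (Or.inl rfl)]
          unfold pvT2
          rw [if_pos (by omega)]
        have hbp : pvGetB (pvFillB src pred m n) (i - 1) 0 = ((i : Int) - 1, pvDesc (i - 1), []) := by
          rw [pvFillB_boundary src pred m n (i - 1) 0 (Or.inl rfl)]
          unfold pvT2
          rcases Nat.eq_zero_or_pos (i - 1) with h | h
          · rw [if_neg (by omega), if_neg (by omega), h]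
            have : (i : Int) - 1 = 0 := by omega
            rw [this]
            rfl
          · rw [if_pos (by omega)]
            have h1 : (((i - 1 : Nat)) : Int) = (i : Int) - 1 := by omega
            rw [h1]
        have hnd : ¬ (i > 0 ∧ (0 : Nat) > 0 ∧ pvGetA (pvFillA src pred m n) i 0
            = pvGetA (pvFillA src pred m n) (i - 1) (0 - 1) + pvCost src pred i 0) := by
          rintro ⟨_, h, _⟩; omega
        have hu : i > 0 ∧ pvGetA (pvFillA src pred m n) i 0 = pvGetA (pvFillA src pred m n) (i - 1) 0 + 1 := by
          refine ⟨hi1, ?_⟩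
          rw [← hfst, ← hfst, hb, hbp]
          ring
        simp only [pvTraceA]
        rw [if_pos hij, if_neg hnd, if_pos hu]
        rw [ih (i - 1) 0 (si ++ [(i : Int) - 1]) pj (by omega) (by omega) (by omega)]
        rw [hb, hbp, pvDesc_succ i hi1]
        simp
      · -- interior cell: the stored chains follow exactly A's branch choice
        have hcell := pvFillB_cell src pred m n i j hi1 him hj1 hjn
        unfold pvCellOK at hcell
        simp only at hcell
        set u := pvGetB (pvFillB src pred m n) (i - 1) j with hu_def
        set l := pvGetB (pvFillB src pred m n) i (j - 1) with hl_def
        set d := pvGetB (pvFillB src pred m n) (i - 1) (j - 1) with hd_def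
        set best := min (u.1 + 1) (min (l.1 + 1) (d.1 + pvCost src pred i j)) with hbest_def
        have hAij : pvGetA (pvFillA src pred m n) i j = best := by
          rw [← hfst, hcell]
          split_ifs <;> rfl
        have hAu : pvGetA (pvFillA src pred m n) (i - 1) j = u.1 := by rw [← hfst, hu_def]
        have hAl : pvGetA (pvFillA src pred m n) i (j - 1) = l.1 := by rw [← hfst, hl_def]
        have hAd : pvGetA (pvFillA src pred m n) (i - 1) (j - 1) = d.1 := by rw [← hfst, hd_def]
        simp only [pvTraceA]
        rw [if_pos hij]
        by_cases hd2 : best = d.1 + pvCost src pred i j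
        · have hc1 : i > 0 ∧ j > 0 ∧ pvGetA (pvFillA src pred m n) i j
              = pvGetA (pvFillA src pred m n) (i - 1) (j - 1) + pvCost src pred i j := by
            exact ⟨hi1, hj1, by rw [hAij, hAd]; exact hd2⟩
          rw [if_pos hc1]
          by_cases hcz : pvCost src pred i j = 1
          · have hcell' : pvGetB (pvFillB src pred m n) i j
                = (best, ((i : Int) - 1) :: d.2.1, ((j : Int) - 1) :: d.2.2) := by
              rw [hcell, if_pos hd2, if_neg (by rw [hcz]; norm_num)]
            rw [if_pos hcz,
              ih (i - 1) (j - 1) (si ++ [(i : Int) - 1]) (pj ++ [(j : Int) - 1]) (by omega) (by omega) (by omega),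
              hcell']
            simp
            exact ⟨rfl, rfl⟩
          · have hc0 := pvCost_cases src pred i j hcz
            have hcell' : pvGetB (pvFillB src pred m n) i j = (best, d.2.1, d.2.2) := by
              rw [hcell, if_pos hd2, if_pos hc0]
            rw [if_neg hcz, ih (i - 1) (j - 1) si pj (by omega) (by omega) (by omega), hcell']
        · have hc1 : ¬ (i > 0 ∧ j > 0 ∧ pvGetA (pvFillA src pred m n) i j
              = pvGetA (pvFillA src pred m n) (i - 1) (j - 1) + pvCost src pred i j) := by
            rintro ⟨_, _, h⟩
            exact hd2 (by rw [← hAij, ← hAd]; exact h)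
          rw [if_neg hc1]
          by_cases hu2 : best = u.1 + 1
          · have hc2 : i > 0 ∧ pvGetA (pvFillA src pred m n) i j = pvGetA (pvFillA src pred m n) (i - 1) j + 1 :=
              ⟨hi1, by rw [hAij, hAu]; exact hu2⟩
            have hcell' : pvGetB (pvFillB src pred m n) i j
                = (best, ((i : Int) - 1) :: u.2.1, u.2.2) := by
              rw [hcell, if_neg hd2, if_pos hu2]
            rw [if_pos hc2, ih (i - 1) j (si ++ [(i : Int) - 1]) pj (by omega) (by omega) (by omega), hcell']
            simp
            exact ⟨rfl, rfl⟩
          · have hc2 : ¬ (i > 0 ∧ pvGetA (pvFillA src pred m n) i j = pvGetA (pvFillA src pred m n) (i - 1) j + 1) := by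
              rintro ⟨_, h⟩
              exact hu2 (by rw [← hAij, ← hAu]; exact h)
            have hcell' : pvGetB (pvFillB src pred m n) i j
                = (best, l.2.1, ((j : Int) - 1) :: l.2.2) := by
              rw [hcell, if_neg hd2, if_neg hu2]
            rw [if_neg hc2, if_pos hj1,
              ih i (j - 1) si (pj ++ [(j : Int) - 1]) (by omega) (by omega) (by omega), hcell']
            simp
            exact ⟨rfl, rfl⟩
    · have hi : i = 0 := by omega
      have hj : j = 0 := by omega
      subst hi; subst hj
      have hb : pvGetB (pvFillB src pred m n) 0 0 = (0, [], []) := by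
        rw [pvFillB_boundary src pred m n 0 0 (Or.inl rfl)]
        unfold pvT2
        rw [if_neg (by omega), if_neg (by omega)]
      simp [pvTraceA, hb]

-- ===== VERDICT (by name: the statement is the Claim_ definition above) =====
theorem compute_edit_distance_masks_py_spec : Claim_equal_compute_edit_distance_masks_py := by
  intro src pred _
  unfold Spec_compute_edit_distance_masks_py
  unfold compute_edit_distance_masks_py compute_edit_distance_masks_py_alt
  by_cases h : src.length = 0 ∧ pred.length = 0
  · simp [h]
  · simp only [h, if_neg, not_false_iff]
    rw [pvTrace_chain src pred src.length pred.length (src.length + pred.length)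
      src.length pred.length [] [] le_rfl le_rfl le_rfl]
    simp
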